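-- pv_equiv track=rewrite | github.com/amirismagilov/store_revenue | app/lib.py | max_sum_store_finding
-- ===== SOURCE A (Python) =====
-- def max_sum_store_finding(stores_revenue):
--     """
--     >>> max_sum_store_finding([[10, 20, 30, 40, 50, 60, 70], [15, 100, 26, 100, 100, 0, 2], [1, 2, 3]])
--     [1]
--
--     >>> max_sum_store_finding([[10, 20, 30, 40, 50, 60, 70], [10, 20, 30, 40, 50, 60, 70], [15, 100, 26, 100]])
--     [0, 1]
--
--     >>> max_sum_store_finding([[10, 20, 30, 40, 50, 60, 70]])
--     [0]
--     """
--     max_sum = sum(stores_revenue[0])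
--     i = 0
--     max_sum_store_number = []
--     number_of_stores = len(stores_revenue)
--
--     while i < number_of_stores:
--
--         if sum(stores_revenue[i]) > max_sum:
--             max_sum = sum(stores_revenue[i])
--             max_sum_store_number.clear()
--             max_sum_store_number.append(i)
--
--         elif sum(stores_revenue[i]) == max_sum:
--             max_sum_store_number.append(i)
--         i += 1
--
--     return max_sum_store_number
-- ===== SOURCE B (Python) =====
-- def max_sum_store_finding(stores_revenue):
--     sums = [sum(s) for s in stores_revenue]
--     best = max(sums)
--     return [i for i, s in enumerate(sums) if s == best]
-- ===== Notes on version B (the rewrite author's own statement) =====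
-- stated objective: simpler
-- what changed: Replaces the index-driven while loop that maintains a running maximum and clears/extends the winner list in place with a three-step pipeline: build the per-store totals table once, take max(sums), and filter the indices equal to it.
import Mathlib
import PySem

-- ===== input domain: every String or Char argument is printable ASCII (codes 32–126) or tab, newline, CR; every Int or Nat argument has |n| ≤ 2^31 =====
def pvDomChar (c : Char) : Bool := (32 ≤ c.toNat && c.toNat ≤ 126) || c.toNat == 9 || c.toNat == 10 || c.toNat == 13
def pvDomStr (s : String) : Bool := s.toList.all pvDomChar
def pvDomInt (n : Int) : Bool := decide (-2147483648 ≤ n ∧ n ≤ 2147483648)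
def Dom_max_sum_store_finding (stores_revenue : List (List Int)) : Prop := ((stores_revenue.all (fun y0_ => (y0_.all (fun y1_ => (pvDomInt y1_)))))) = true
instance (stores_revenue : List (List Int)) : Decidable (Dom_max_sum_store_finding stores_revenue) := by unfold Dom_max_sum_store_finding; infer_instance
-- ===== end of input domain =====

-- B replaces A's index-driven running-max while loop (which clears/extends the winner list
-- in place) by a pipeline: totals table, max(sums), then a filter of the equal indices.
-- Objective: simpler.

-- ===== PORT A =====
-- sum(l) for a list of ints
def pySum (l : List Int) : Int := l.foldl (· + ·) 0

-- the while loop: i counts up to number_of_stores; stores[i] is in range whenever i < n,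
-- so the in-range access is ported with getD (exact there)
def maxLoopA (stores : List (List Int)) (n i : Nat) (maxSum : Int) (acc : List Int) : List Int :=
  if i < n then
    if pySum (stores.getD i []) > maxSum then
      maxLoopA stores n (i + 1) (pySum (stores.getD i [])) [(i : Int)]
    else if pySum (stores.getD i []) = maxSum then
      maxLoopA stores n (i + 1) maxSum (acc ++ [(i : Int)])
    else
      maxLoopA stores n (i + 1) maxSum acc
  else acc
termination_by n - i

-- stores_revenue[0] raises IndexError on []; Pre_ excludes that, so getD is exact here
def max_sum_store_finding (stores_revenue : List (List Int)) : List Int :=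
  maxLoopA stores_revenue stores_revenue.length 0 (pySum (stores_revenue.getD 0 [])) []

-- ===== PORT B =====
-- sums table, then max(sums) (raises on [] — excluded by Pre_), then the filtering pass
def max_sum_store_finding_alt (stores_revenue : List (List Int)) : List Int :=
  let sums := stores_revenue.map pySum
  match PySem.List.max? sums (fun x => x) with
  | none => []   -- Python raises ValueError here; outside Pre_
  | some best => ((PySem.List.enumerate sums 0).filter (fun p => p.2 == best)).map (fun p => p.1)

-- ===== PRECONDITION & SPEC =====
-- A raises IndexError on the empty list (stores_revenue[0]); B's max(sums) also raises there.
def Pre_max_sum_store_finding (stores_revenue : List (List Int)) : Prop := stores_revenue ≠ []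
instance (stores_revenue : List (List Int)) : Decidable (Pre_max_sum_store_finding stores_revenue) := by unfold Pre_max_sum_store_finding; infer_instance
def pvWitness_max_sum_store_finding : List (List Int) := [[1, 2], [3]]

def Spec_max_sum_store_finding (stores_revenue : List (List Int)) (out : List Int) : Prop := out = max_sum_store_finding_alt stores_revenue
instance (stores_revenue : List (List Int)) (out : List Int) : Decidable (Spec_max_sum_store_finding stores_revenue out) := by unfold Spec_max_sum_store_finding; infer_instance

-- ===== CLAIM (what is proved, stated in full; the proofs are below) =====
def Claim_equal_max_sum_store_finding : Prop := ∀ (stores_revenue : List (List Int)), Dom_max_sum_store_finding stores_revenue → Pre_max_sum_store_finding stores_revenue → Spec_max_sum_store_finding stores_revenue (max_sum_store_finding stores_revenue)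

-- ===== LEMMAS AND PROOFS =====

-- indices (from i) of the elements of l equal to M, as B's filter produces them
def idxEq (l : List Int) (i : Nat) (M : Int) : List Int :=
  match l with
  | [] => []
  | x :: r => (if M = x then [(i : Int)] else []) ++ idxEq r (i + 1) M

lemma loop_eq (stores : List (List Int)) :
    ∀ (k i : Nat) (m : Int) (acc : List Int), stores.length - i = k →
      maxLoopA stores stores.length i m acc =
        (if ((stores.map pySum).drop i).foldl max m = m then acc else []) ++
          idxEq ((stores.map pySum).drop i) i (((stores.map pySum).drop i).foldl max m) := by
  intro k
  induction k with
  | zero =>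
    intro i m acc hk
    have hni : ¬ i < stores.length := by omega
    have hdrop : ((stores.map pySum).drop i) = [] := by
      apply List.drop_eq_nil_of_le; simpa using Nat.le_of_not_lt hni
    rw [maxLoopA]
    simp [hni, hdrop, idxEq]
  | succ k ih =>
    intro i m acc hk
    have hi : i < stores.length := by omega
    have him : i < (stores.map pySum).length := by simpa using hi
    have hdrop : (stores.map pySum).drop i =
        (stores.map pySum)[i] :: (stores.map pySum).drop (i + 1) :=
      List.drop_eq_getElem_cons him
    have hget : pySum (stores.getD i []) = (stores.map pySum)[i] := by
      rw [List.getD_eq_getElem _ _ hi]; simp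
    set x := (stores.map pySum)[i] with hx
    set rest := (stores.map pySum).drop (i + 1) with hrest
    have hfold : ((stores.map pySum).drop i).foldl max m = rest.foldl max (max m x) := by
      rw [hdrop]; rfl
    have hk' : stores.length - (i + 1) = k := by omega
    rw [maxLoopA]
    simp only [hi, if_pos, hget]
    rw [hfold, hdrop]
    by_cases h1 : x > m
    · have hmx : max m x = x := by omega
      rw [if_pos h1, ih (i + 1) x [(i : Int)] hk', ← hrest, hmx]
      have hle : x ≤ rest.foldl max x := (PySem.List.le_foldl_max rest x).1
      have hne : ¬ rest.foldl max x = m := by omega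
      rw [if_neg hne, idxEq]
      by_cases h2 : rest.foldl max x = x
      · rw [if_pos h2, h2]; simp
      · rw [if_neg h2]; simp
    · rw [if_neg h1]
      have hmx : max m x = m := by omega
      rw [hmx]
      by_cases h2 : x = m
      · rw [if_pos h2, ih (i + 1) m (acc ++ [(i : Int)]) hk', ← hrest, idxEq]
        by_cases h3 : rest.foldl max m = m
        · rw [if_pos h3, if_pos (h3.trans h2.symm : rest.foldl max m = x)]
          rw [if_pos h3]
          simp
        · rw [if_neg h3, if_neg h3, if_neg (fun e => h3 (e.trans h2))]
          simp
      · rw [if_neg h2, ih (i + 1) m acc hk', ← hrest, idxEq]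
        have hlt : x < m := by omega
        have hle : m ≤ rest.foldl max m := (PySem.List.le_foldl_max rest m).1
        have hne : ¬ rest.foldl max m = x := by omega
        rw [if_neg hne]
        simp

lemma filter_enum_eq_idxEq (M : Int) :
    ∀ (l : List Int) (s : Nat),
      ((PySem.List.enumerate l (s : Int)).filter (fun p => p.2 == M)).map (fun p => p.1) =
        idxEq l s M := by
  intro l
  induction l with
  | nil => intro s; simp [PySem.List.enumerate_nil, idxEq]
  | cons x r ih =>
    intro s
    have hcast : ((s : Int) + 1) = ((s + 1 : Nat) : Int) := by push_cast; ring
    rw [PySem.List.enumerate_cons, idxEq, List.filter_cons, hcast]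
    by_cases h : x = M
    · have hb : ((s : Int), x).2 == M := by simpa using h
      rw [if_pos hb, if_pos h.symm, List.map_cons, ih (s + 1)]
      rfl
    · have hb : ¬ (((s : Int), x).2 == M) := by simpa using h
      rw [if_neg hb, if_neg (fun e => h e.symm), ih (s + 1)]
      rfl

-- ===== VERDICT (by name: the statement is the Claim_ definition above) =====
theorem max_sum_store_finding_spec : Claim_equal_max_sum_store_finding := by
  intro stores _hdom hpre
  unfold Spec_max_sum_store_finding max_sum_store_finding max_sum_store_finding_alt
  obtain ⟨h, t, rfl⟩ : ∃ h t, stores = h :: t := by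
    cases stores with
    | nil => exact absurd rfl hpre
    | cons a b => exact ⟨a, b, rfl⟩
  have hmap : (h :: t).map pySum = pySum h :: t.map pySum := rfl
  rw [loop_eq (h :: t) ((h :: t).length - 0) 0 (pySum ((h :: t).getD 0 [])) [] rfl]
  simp only [List.drop_zero, hmap, List.getD_cons_zero]
  rw [PySem.List.max?_id_cons]
  have hfold : (pySum h :: t.map pySum).foldl max (pySum h) =
      (t.map pySum).foldl max (pySum h) := by
    simp [List.foldl_cons]
  rw [hfold]
  rw [← filter_enum_eq_idxEq ((t.map pySum).foldl max (pySum h)) (pySum h :: t.map pySum) 0]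
  simp
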